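-- pv_equiv track=rewrite | github.com/acarrasco/advent_of_code | 2024/day22/part2.py | generate_diffs_and_price
-- ===== SOURCE A (Python) =====
-- def generate_diffs_and_price(prices):
--     it = iter(prices)
--     a = next(it, None)
--     b = next(it, None)
--     c = next(it, None)
--     d = next(it, None)
--     e = next(it, None)
--
--     while e is not None:
--         yield (b-a, c-b, d-c, e-d), e
--         a, b, c, d = b, c, d, e
--         e = next(it, None)
-- ===== SOURCE B (Python) =====
-- def generate_diffs_and_price(prices):
--     L = list(prices)
--     diffs = [L[k + 1] - L[k] for k in range(len(L) - 1)]
--     return [((diffs[i - 4], diffs[i - 3], diffs[i - 2], diffs[i - 1]), L[i])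
--             for i in range(4, len(L))]
-- ===== Notes on version B (the rewrite author's own statement) =====
-- stated objective: alternative
-- what changed: Replaces A's five-variable sliding-window state machine over a manual iterator with two staged passes over a materialized list: first a difference list diffs[k]=L[k+1]-L[k], then index arithmetic pairing diffs[i-4..i-1] with L[i] for i in range(4,len(L)).
import Mathlib
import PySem

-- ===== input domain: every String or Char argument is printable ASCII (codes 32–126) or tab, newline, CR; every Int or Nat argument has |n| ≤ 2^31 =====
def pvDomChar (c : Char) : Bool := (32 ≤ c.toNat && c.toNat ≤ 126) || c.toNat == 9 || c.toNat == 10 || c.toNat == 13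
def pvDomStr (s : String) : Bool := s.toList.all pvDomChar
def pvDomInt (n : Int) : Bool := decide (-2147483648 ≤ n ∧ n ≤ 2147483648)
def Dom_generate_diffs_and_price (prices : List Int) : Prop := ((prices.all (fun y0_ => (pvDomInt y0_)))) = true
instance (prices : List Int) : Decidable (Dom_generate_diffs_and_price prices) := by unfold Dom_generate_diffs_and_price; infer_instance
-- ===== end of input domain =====

-- B replaces A's five-variable sliding-window state machine over a manual iterator by two
-- staged passes over a materialized list: a difference list, then index arithmetic (same O(n) cost).
-- Both Pythons produce the same sequence of values; A is a generator, B returns a list — the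
-- equivalence is about that sequence of values (as a list).

-- ===== PORT A =====
-- A's while loop: window state a b c d e, remaining iterator elements 'rest'
def pvALoop (a b c d e : Int) (rest : List Int) : List ((Int × Int × Int × Int) × Int) :=
  ((b - a, c - b, d - c, e - d), e) ::
    match rest with
    | [] => []
    | x :: xs => pvALoop b c d e x xs

def generate_diffs_and_price (prices : List Int) : List ((Int × Int × Int × Int) × Int) :=
  match prices with
  | a :: b :: c :: d :: e :: rest => pvALoop a b c d e rest
  | _ => []

-- ===== PORT B =====
-- L[k] is ported as pyGetD L k 0: every index B forms lies in range, so the default is never used.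
def generate_diffs_and_price_alt (prices : List Int) : List ((Int × Int × Int × Int) × Int) :=
  let L := prices
  let diffs := (PySem.List.pyRange 0 ((L.length : Int) - 1) 1).map
      (fun k => PySem.List.pyGetD L (k + 1) 0 - PySem.List.pyGetD L k 0)
  (PySem.List.pyRange 4 (L.length : Int) 1).map
      (fun i => ((PySem.List.pyGetD diffs (i - 4) 0, PySem.List.pyGetD diffs (i - 3) 0,
                  PySem.List.pyGetD diffs (i - 2) 0, PySem.List.pyGetD diffs (i - 1) 0),
                 PySem.List.pyGetD L i 0))

-- ===== PRECONDITION & SPEC =====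
def Spec_generate_diffs_and_price (prices : List Int) (out : List ((Int × Int × Int × Int) × Int)) : Prop := out = generate_diffs_and_price_alt prices
instance (prices : List Int) (out : List ((Int × Int × Int × Int) × Int)) : Decidable (Spec_generate_diffs_and_price prices out) := by unfold Spec_generate_diffs_and_price; infer_instance

-- ===== CLAIM (what is proved, stated in full; the proofs are below) =====
def Claim_equal_generate_diffs_and_price : Prop := ∀ (prices : List Int), Dom_generate_diffs_and_price prices → Spec_generate_diffs_and_price prices (generate_diffs_and_price prices)

-- ===== LEMMAS AND PROOFS =====

-- the common specification: the window ending at position n+4 of L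
def pvWin (L : List Int) (n : Nat) : (Int × Int × Int × Int) × Int :=
  ((L.getD (n+1) 0 - L.getD n 0, L.getD (n+2) 0 - L.getD (n+1) 0,
    L.getD (n+3) 0 - L.getD (n+2) 0, L.getD (n+4) 0 - L.getD (n+3) 0),
   L.getD (n+4) 0)

theorem pvALoop_eq_map (a b c d e : Int) (rest : List Int) :
    pvALoop a b c d e rest
      = (List.range (rest.length + 1)).map (pvWin (a :: b :: c :: d :: e :: rest)) := by
  induction rest generalizing a b c d e with
  | nil => simp [pvALoop, pvWin]
  | cons x xs ih =>
      have hmap : (List.range (xs.length + 1 + 1)).map (pvWin (a :: b :: c :: d :: e :: x :: xs))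
          = pvWin (a :: b :: c :: d :: e :: x :: xs) 0
              :: (List.range (xs.length + 1)).map (pvWin (b :: c :: d :: e :: x :: xs)) := by
        rw [List.range_succ_eq_map, List.map_cons, List.map_map]
        congr 2
      rw [pvALoop, ih, List.length_cons, hmap]
      congr 1

theorem alt_eq_map (L : List Int) :
    generate_diffs_and_price_alt L = (List.range (L.length - 4)).map (pvWin L) := by
  show (PySem.List.pyRange 4 (L.length : Int) 1).map _ = _
  rw [PySem.List.pyRange_one 4 (L.length : Int), List.map_map]
  rw [show ((L.length : Int) - 4).toNat = L.length - 4 from by omega]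
  refine List.map_congr_left (fun n hn => ?_)
  have hn' : n < L.length - 4 := List.mem_range.mp hn
  simp only [Function.comp_apply]
  have hdiff : ∀ (j : Int) (q : Nat), j = (q : Int) → q + 1 < L.length →
      PySem.List.pyGetD ((PySem.List.pyRange 0 ((L.length : Int) - 1) 1).map
        (fun k => PySem.List.pyGetD L (k + 1) 0 - PySem.List.pyGetD L k 0)) j 0
        = L.getD (q + 1) 0 - L.getD q 0 := by
    intro j q hj hq
    subst hj
    rw [PySem.List.pyGetD_map_pyRange_of_nonneg _ _ _ _ (by omega) (by omega)]
    rw [show ((q : Nat) : Int) + 1 = ((q + 1 : Nat) : Int) from by push_cast; ring,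
        PySem.List.pyGetD_natCast, PySem.List.pyGetD_natCast]
  rw [hdiff ((4 : Int) + n - 4) n (by omega) (by omega),
      hdiff ((4 : Int) + n - 3) (n + 1) (by push_cast; ring) (by omega),
      hdiff ((4 : Int) + n - 2) (n + 2) (by push_cast; ring) (by omega),
      hdiff ((4 : Int) + n - 1) (n + 3) (by push_cast; ring) (by omega)]
  rw [show (4 : Int) + n = ((n + 4 : Nat) : Int) from by push_cast; ring,
      PySem.List.pyGetD_natCast]
  simp [pvWin]

-- ===== VERDICT (by name: the statement is the Claim_ definition above) =====
theorem generate_diffs_and_price_spec : Claim_equal_generate_diffs_and_price := by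
  intro prices _
  unfold Spec_generate_diffs_and_price
  rw [alt_eq_map]
  match prices with
  | a :: b :: c :: d :: e :: rest =>
      rw [generate_diffs_and_price, pvALoop_eq_map]
      rfl
  | [] | [_] | [_, _] | [_, _, _] | [_, _, _, _] =>
      simp [generate_diffs_and_price]
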